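-- pv_equiv track=rewrite | github.com/IanJunji/Problema_dos_clashs | markup_generator.py | contagem_conflitos_totais
-- ===== SOURCE A (Python) =====
-- def contagem_conflitos_totais(clashs):
--     lista_conflitos = []
--     contagem_conflitos_total = []
--     for clash in clashs:
--         if clash.get('layer_1') and clash.get('layer_2'):
--             key = f"{clash['layer_1']}%{clash['layer_2']}"
--             key_inv = f"{clash['layer_2']}%{clash['layer_1']}"
--             if key not in lista_conflitos and key_inv not in lista_conflitos:
--                 lista_conflitos.append(key)
--                 contagem_conflitos_total.append(1)
--             else:
--                 for i in range(len(lista_conflitos)):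
--                     if lista_conflitos[i] == key:
--                         contagem_conflitos_total[i] += 1
--     return lista_conflitos, contagem_conflitos_total
-- ===== SOURCE B (Python) =====
-- def contagem_conflitos_totais(clashs):
--     # Staged pipeline: extract the valid layer pairs, count every directed pair up front,
--     # then one selection pass emits first-seen representatives (skipping pairs whose
--     # reverse was seen first) and reads their final totals from the precomputed counter.
--     pares = [(c['layer_1'], c['layer_2']) for c in clashs
--              if c.get('layer_1') and c.get('layer_2')]
--     contagem = {}
--     for p in pares:
--         contagem[p] = contagem.get(p, 0) + 1
--     nomes, totais, vistos = [], [], set()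
--     for a, b in pares:
--         if (a, b) not in vistos and (b, a) not in vistos:
--             vistos.add((a, b))
--             nomes.append(f"{a}%{b}")
--             totais.append(contagem[(a, b)])
--     return nomes, totais
-- ===== Notes on version B (the rewrite author's own statement) =====
-- stated objective: alternative
-- what changed: A is one online loop that tests membership in the result list and rescans it by index to increment; B is a staged pipeline: extract the valid layer pairs, count every directed pair once into a dict, then a single selection pass emits first-seen representatives (skipping pairs whose reverse came first) reading their final totals from the precomputed counter.
import Mathlib
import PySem

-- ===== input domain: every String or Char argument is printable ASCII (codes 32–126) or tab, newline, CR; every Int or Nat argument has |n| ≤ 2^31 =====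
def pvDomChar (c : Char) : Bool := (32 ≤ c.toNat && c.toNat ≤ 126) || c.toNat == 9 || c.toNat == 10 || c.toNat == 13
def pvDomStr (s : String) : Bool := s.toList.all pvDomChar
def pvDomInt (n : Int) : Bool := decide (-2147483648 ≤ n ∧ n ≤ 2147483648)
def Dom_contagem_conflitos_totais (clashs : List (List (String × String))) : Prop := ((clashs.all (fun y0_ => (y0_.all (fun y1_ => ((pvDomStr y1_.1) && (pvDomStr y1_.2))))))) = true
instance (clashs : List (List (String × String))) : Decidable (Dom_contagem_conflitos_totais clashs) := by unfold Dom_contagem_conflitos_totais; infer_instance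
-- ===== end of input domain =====

-- B is a staged pipeline (extract pairs, count them all up front, then one selection pass
-- reading final totals from the counter) instead of A's online loop with inner index scan
-- (objective: alternative algorithm, same cost on the measured inputs).

-- ===== PORT A =====
-- loop body of A's 'for clash in clashs'; state = (lista_conflitos, contagem_conflitos_total)
def pvStepA (st : List String × List Int) (clash : List (String × String)) :
    List String × List Int :=
  match clash.lookup "layer_1", clash.lookup "layer_2" with
  | some l1, some l2 =>
    if l1 != "" && l2 != "" then
      let key := l1 ++ "%" ++ l2
      let key_inv := l2 ++ "%" ++ l1
      if key ∉ st.1 ∧ key_inv ∉ st.1 then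
        (st.1 ++ [key], st.2 ++ [1])
      else
        (st.1, (List.range st.1.length).foldl
          (fun c i => if st.1[i]? = some key then c.set i (c.getD i 0 + 1) else c) st.2)
    else st
  | _, _ => st

def contagem_conflitos_totais (clashs : List (List (String × String))) : List String × List Int :=
  clashs.foldl pvStepA ([], [])

-- ===== PORT B =====
-- B's comprehension filter+extract: the (layer_1, layer_2) pair of a valid clash
def pvParOf (clash : List (String × String)) : Option (String × String) :=
  match clash.lookup "layer_1", clash.lookup "layer_2" with
  | some l1, some l2 => if l1 != "" && l2 != "" then some (l1, l2) else none
  | _, _ => none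

-- loop body of B's selection pass; state = (nomes, totais, vistos)
def pvSelStep (contagem : PySem.Dict (String × String) Int)
    (st : List String × List Int × PySem.Set (String × String)) (p : String × String) :
    List String × List Int × PySem.Set (String × String) :=
  if !(PySem.Set.contains st.2.2 p) && !(PySem.Set.contains st.2.2 (p.2, p.1)) then
    (st.1 ++ [p.1 ++ "%" ++ p.2], st.2.1 ++ [contagem.getD p 0], PySem.Set.add st.2.2 p)
  else st

def contagem_conflitos_totais_alt (clashs : List (List (String × String))) : List String × List Int :=
  let pares := clashs.filterMap pvParOf
  let contagem := pares.foldl (fun d p => d.insert p (d.getD p 0 + 1)) PySem.Dict.empty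
  let fin := pares.foldl (pvSelStep contagem) ([], [], PySem.Set.empty)
  (fin.1, fin.2.1)

-- ===== PRECONDITION & SPEC =====
-- Pre_ excludes inputs where the '%'-joined keys of two valid clashes collide (the same
-- string arising from different layer pairs, directly or against a reversed pair) — possible
-- only when a layer name itself contains '%'; A's behaviour there is an accident of the
-- string encoding, while B identifies conflicts by the actual pair of layer names.
def Pre_contagem_conflitos_totais (clashs : List (List (String × String))) : Prop :=
  ∀ c ∈ clashs, ∀ c' ∈ clashs,
    ((c.lookup "layer_1").getD "" ≠ "" ∧ (c.lookup "layer_2").getD "" ≠ "" ∧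
     (c'.lookup "layer_1").getD "" ≠ "" ∧ (c'.lookup "layer_2").getD "" ≠ "") →
    ((c.lookup "layer_1").getD "" ++ "%" ++ (c.lookup "layer_2").getD ""
        = (c'.lookup "layer_1").getD "" ++ "%" ++ (c'.lookup "layer_2").getD "" →
      (c.lookup "layer_1").getD "" = (c'.lookup "layer_1").getD "" ∧
      (c.lookup "layer_2").getD "" = (c'.lookup "layer_2").getD "") ∧
    ((c.lookup "layer_1").getD "" ++ "%" ++ (c.lookup "layer_2").getD ""
        = (c'.lookup "layer_2").getD "" ++ "%" ++ (c'.lookup "layer_1").getD "" →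
      (c.lookup "layer_1").getD "" = (c'.lookup "layer_2").getD "" ∧
      (c.lookup "layer_2").getD "" = (c'.lookup "layer_1").getD "")
instance (clashs : List (List (String × String))) : Decidable (Pre_contagem_conflitos_totais clashs) := by unfold Pre_contagem_conflitos_totais; infer_instance
def pvWitness_contagem_conflitos_totais : (List (List (String × String))) :=
  [[("layer_1", "a"), ("layer_2", "b")], [("layer_1", "b"), ("layer_2", "a")]]

def Spec_contagem_conflitos_totais (clashs : List (List (String × String))) (out : List String × List Int) : Prop := out = contagem_conflitos_totais_alt clashs
instance (clashs : List (List (String × String))) (out : List String × List Int) : Decidable (Spec_contagem_conflitos_totais clashs out) := by unfold Spec_contagem_conflitos_totais; infer_instance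

-- ===== CLAIM (what is proved, stated in full; the proofs are below) =====
def Claim_equal_contagem_conflitos_totais : Prop := ∀ (clashs : List (List (String × String))), Dom_contagem_conflitos_totais clashs → Pre_contagem_conflitos_totais clashs → Spec_contagem_conflitos_totais clashs (contagem_conflitos_totais clashs)

-- ===== LEMMAS AND PROOFS =====

-- the string key A builds from a pair
def pvEnc (p : String × String) : String := p.1 ++ "%" ++ p.2

-- the pairwise key-injectivity Pre_ supplies for the extracted pairs
def pvInjOn (U : List (String × String)) : Prop :=
  ∀ p ∈ U, ∀ q ∈ U, (pvEnc p = pvEnc q → p = q) ∧ (pvEnc p = pvEnc (q.2, q.1) → p = (q.2, q.1))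

-- A's loop body specialised to a valid clash with pair p (same computation on strings)
def pvStepA' (st : List String × List Int) (p : String × String) :
    List String × List Int :=
  let key := p.1 ++ "%" ++ p.2
  let key_inv := p.2 ++ "%" ++ p.1
  if key ∉ st.1 ∧ key_inv ∉ st.1 then
    (st.1 ++ [key], st.2 ++ [1])
  else
    (st.1, (List.range st.1.length).foldl
      (fun c i => if st.1[i]? = some key then c.set i (c.getD i 0 + 1) else c) st.2)

theorem pvStepA_eq (st : List String × List Int) (c : List (String × String)) :
    pvStepA st c = match pvParOf c with
      | some p => pvStepA' st p
      | none => st := by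
  unfold pvStepA pvParOf pvStepA'
  cases c.lookup "layer_1" <;> cases c.lookup "layer_2" <;> simp only []
  split <;> rfl

-- A's inner 'for i in range(len(lista))': with lista Nodup it increments at idxOf key, if key occurs
theorem pvInnerLoop (l : List String) (key : String) (hnd : l.Nodup) :
    ∀ (n : Nat), n ≤ l.length → ∀ (cont : List Int),
    (List.range n).foldl
      (fun c i => if l[i]? = some key then c.set i (c.getD i 0 + 1) else c) cont
    = if key ∈ l.take n then cont.set (l.idxOf key) (cont.getD (l.idxOf key) 0 + 1) else cont := by
  intro n
  induction n with
  | zero => intro _ cont; simp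
  | succ m ih =>
      intro hm cont
      have hmlt : m < l.length := hm
      rw [List.range_succ, List.foldl_append, ih (Nat.le_of_succ_le hm) cont]
      have htake : l.take (m + 1) = l.take m ++ [l[m]] := List.take_succ_eq_append_getElem hmlt
      have hget : l[m]? = some l[m] := List.getElem?_eq_getElem hmlt
      by_cases hk : l[m] = key
      · subst hk
        have hnotin : l[m] ∉ l.take m := by
          intro hmem
          rcases List.mem_take_iff_getElem.mp hmem with ⟨j, hj, hje⟩
          have hjm : j = m := (List.Nodup.getElem_inj_iff hnd).mp hje
          omega
        have hidx : l.idxOf l[m] = m := List.Nodup.idxOf_getElem hnd m hmlt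
        have hin1 : l[m] ∈ l.take (m + 1) := by
          rw [htake]; exact List.mem_append_right _ List.mem_cons_self
        rw [if_neg hnotin, if_pos hin1, List.foldl_cons, List.foldl_nil, if_pos hget, hidx]
      · have hne : l[m]? ≠ some key := by
          rw [hget]; intro hc; exact hk (Option.some.inj hc)
        have hmem : (key ∈ l.take (m + 1)) = (key ∈ l.take m) := by
          rw [htake]
          simp only [List.mem_append, List.mem_singleton, eq_comm (a := key)]
          simp [hk]
        simp only [List.foldl_cons, List.foldl_nil, if_neg hne, hmem]

-- the counting loop of Source B: getD reads the count
theorem pvCounterGetD (l : List (String × String)) :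
    ∀ (d : PySem.Dict (String × String) Int) (q : String × String),
    (l.foldl (fun d p => d.insert p (d.getD p 0 + 1)) d).getD q 0
      = d.getD q 0 + (l.count q : Int) := by
  induction l with
  | nil => intro d q; simp
  | cons p l ih =>
      intro d q
      rw [List.foldl_cons, ih]
      by_cases hq : q = p
      · subst hq
        rw [PySem.Dict.getD_insert_self, List.count_cons_self]
        push_cast; ring
      · rw [PySem.Dict.getD_insert_of_ne _ _ _ hq]
        simp [Ne.symm hq]

-- membership of an encoded key in the encoded rep list, for %-free pairs
theorem pvMemEnc {U P : List (String × String)} {p : String × String}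
    (hU : pvInjOn U) (hP : ∀ q ∈ P, q ∈ U) (hp : p ∈ U) :
    pvEnc p ∈ P.map pvEnc ↔ p ∈ P := by
  constructor
  · intro h
    obtain ⟨q, hq, he⟩ := List.mem_map.mp h
    exact ((hU q (hP q hq) p hp).1 he) ▸ hq
  · exact List.mem_map_of_mem

theorem pvMemEncSwap {U P : List (String × String)} {p : String × String}
    (hU : pvInjOn U) (hP : ∀ q ∈ P, q ∈ U) (hp : p ∈ U) :
    pvEnc (p.2, p.1) ∈ P.map pvEnc ↔ (p.2, p.1) ∈ P := by
  constructor
  · intro h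
    obtain ⟨q, hq, he⟩ := List.mem_map.mp h
    exact ((hU q (hP q hq) p hp).2 he) ▸ hq
  · exact List.mem_map_of_mem

-- the main simulation: folding the same entry list, A's and B's states stay in step
theorem pvMain (d : PySem.Dict (String × String) Int) (U : List (String × String))
    (hU : pvInjOn U) (es : List (String × String)) :
    ∀ (P : List (String × String)) (C T : List Int) (S : PySem.Set (String × String)),
    (∀ p ∈ es, p ∈ U) → (∀ p ∈ P, p ∈ U) → P.Nodup →
    C.length = P.length → T.length = P.length →
    (∀ i, i < P.length → T.getD i 0 = C.getD i 0 + (es.count (P.getD i ("", "")) : Int)) →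
    (∀ q, q ∈ U → q ∉ P → (q.2, q.1) ∉ P → d.getD q 0 = (es.count q : Int)) →
    (∀ q, PySem.Set.contains S q = true ↔ q ∈ P) →
    (es.foldl pvStepA' (P.map pvEnc, C)).1 = (es.foldl (pvSelStep d) (P.map pvEnc, T, S)).1 ∧
    (es.foldl pvStepA' (P.map pvEnc, C)).2 = (es.foldl (pvSelStep d) (P.map pvEnc, T, S)).2.1 := by
  induction es with
  | nil =>
      intro P C T S _ _ _ hC hT hTC _ _
      refine ⟨rfl, ?_⟩
      apply List.ext_getElem (hC.trans hT.symm)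
      intro i h1 h2
      have h3 : i < P.length := hC ▸ h1
      have := hTC i h3
      rw [List.getD_eq_getElem T 0 h2, List.getD_eq_getElem C 0 h1] at this
      simp at this
      omega
  | cons p es ih =>
      intro P C T S hfe hfP hnd hC hT hTC hd hS
      have hp : p ∈ U := hfe p List.mem_cons_self
      have hfe' : ∀ q ∈ es, q ∈ U := fun q hq => hfe q (List.mem_cons_of_mem _ hq)
      have hLnd : (P.map pvEnc).Nodup :=
        List.Nodup.map_on (fun x hx y hy he => (hU x (hfP x hx) y (hfP y hy)).1 he) hnd
      have hmem1 : pvEnc p ∈ P.map pvEnc ↔ p ∈ P := pvMemEnc hU hfP hp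
      have hmem2 : pvEnc (p.2, p.1) ∈ P.map pvEnc ↔ (p.2, p.1) ∈ P := pvMemEncSwap hU hfP hp
      rw [List.foldl_cons, List.foldl_cons]
      by_cases h1 : p ∈ P
      · -- seen pair: A increments at its index, B skips
        have hkey : pvEnc p ∈ P.map pvEnc := hmem1.mpr h1
        have hcond : ¬ ((p.1 ++ "%" ++ p.2) ∉ P.map pvEnc ∧ (p.2 ++ "%" ++ p.1) ∉ P.map pvEnc) :=
          fun hc => hc.1 hkey
        have hcontains : PySem.Set.contains S p = true := (hS p).mpr h1
        have hstB : pvSelStep d (P.map pvEnc, T, S) p = (P.map pvEnc, T, S) := by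
          unfold pvSelStep; rw [hcontains]; rfl
        have hi0lt : (P.map pvEnc).idxOf (pvEnc p) < (P.map pvEnc).length :=
          List.idxOf_lt_length_of_mem hkey
        set i0 := (P.map pvEnc).idxOf (pvEnc p) with hi0
        have hi0P : i0 < P.length := by simpa using hi0lt
        have hPi0 : P[i0] = p := by
          have h' : (P.map pvEnc)[i0] = pvEnc p := List.getElem_idxOf hi0lt
          rw [List.getElem_map] at h'
          exact (hU _ (hfP _ (P.getElem_mem hi0P)) p hp).1 h'
        have hstA : pvStepA' (P.map pvEnc, C) p
            = (P.map pvEnc, C.set i0 (C.getD i0 0 + 1)) := by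
          unfold pvStepA'
          dsimp only
          rw [if_neg hcond]
          have hloop := pvInnerLoop (P.map pvEnc) (p.1 ++ "%" ++ p.2) hLnd (P.map pvEnc).length
            (le_refl _) C
          rw [List.take_length] at hloop
          have hkey' : p.1 ++ "%" ++ p.2 ∈ List.map pvEnc P := hkey
          refine congrArg (Prod.mk (List.map pvEnc P)) ?_
          rw [hloop, if_pos hkey']
          rfl
        rw [hstA, hstB]
        apply ih P (C.set i0 (C.getD i0 0 + 1)) T S hfe' hfP hnd (by simpa using hC) hT
        · intro i hi
          have hTCi := hTC i hi
          by_cases hii : i = i0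
          · have hiC : i0 < C.length := by omega
            have hset : (C.set i0 (C.getD i0 0 + 1)).getD i 0 = C.getD i 0 + 1 := by
              rw [hii, List.getD_eq_getElem?_getD, List.getElem?_set_self hiC,
                Option.getD_some]
            rw [hset]
            have hPg : P.getD i ("", "") = p := by
              rw [hii, List.getD_eq_getElem P _ hi0P]; exact hPi0
            rw [hPg] at hTCi ⊢
            rw [List.count_cons_self] at hTCi
            push_cast at hTCi ⊢
            omega
          · have hset : (C.set i0 (C.getD i0 0 + 1)).getD i 0 = C.getD i 0 := by
              rw [List.getD_eq_getElem?_getD, List.getElem?_set_ne (fun h => hii h.symm),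
                ← List.getD_eq_getElem?_getD]
            rw [hset]
            have hPne : P.getD i ("", "") ≠ p := by
              rw [List.getD_eq_getElem P _ hi]
              intro h
              exact hii ((List.Nodup.getElem_inj_iff hnd).mp (h.trans hPi0.symm))
            rwa [List.count_cons_of_ne (fun h => hPne h.symm)] at hTCi
        · intro q hqf hq1 hq2
          have := hd q hqf hq1 hq2
          have hqp : q ≠ p := fun h => hq1 (h ▸ h1)
          rwa [List.count_cons_of_ne (fun h => hqp h.symm)] at this
        · exact hS
      · by_cases h2 : (p.2, p.1) ∈ P
        · -- reverse pair seen: both sides leave the state unchanged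
          have hcond : ¬ ((p.1 ++ "%" ++ p.2) ∉ P.map pvEnc ∧ (p.2 ++ "%" ++ p.1) ∉ P.map pvEnc) :=
            fun hc => hc.2 (hmem2.mpr h2)
          have hkey : pvEnc p ∉ P.map pvEnc := fun h => h1 (hmem1.mp h)
          have hcontains : PySem.Set.contains S (p.2, p.1) = true := (hS _).mpr h2
          have hstB : pvSelStep d (P.map pvEnc, T, S) p = (P.map pvEnc, T, S) := by
            unfold pvSelStep; rw [hcontains]; simp
          have hstA : pvStepA' (P.map pvEnc, C) p = (P.map pvEnc, C) := by
            unfold pvStepA'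
            dsimp only
            rw [if_neg hcond]
            have hloop := pvInnerLoop (P.map pvEnc) (p.1 ++ "%" ++ p.2) hLnd (P.map pvEnc).length
              (le_refl _) C
            rw [List.take_length] at hloop
            have hkey' : p.1 ++ "%" ++ p.2 ∉ List.map pvEnc P := hkey
            refine congrArg (Prod.mk (List.map pvEnc P)) ?_
            rw [hloop, if_neg hkey']
          rw [hstA, hstB]
          apply ih P C T S hfe' hfP hnd hC hT
          · intro i hi
            have hTCi := hTC i hi
            have hPne : P.getD i ("", "") ≠ p := by
              rw [List.getD_eq_getElem P _ hi]
              intro h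
              exact h1 (h ▸ P.getElem_mem hi)
            rwa [List.count_cons_of_ne (fun h => hPne h.symm)] at hTCi
          · intro q hqf hq1 hq2
            have := hd q hqf hq1 hq2
            have hqp : q ≠ p := fun h => hq2 (by rw [h]; exact h2)
            rwa [List.count_cons_of_ne (fun h => hqp h.symm)] at this
          · exact hS
        · -- fresh pair: A appends (key, 1), B appends (key, final total) and records p
          have hkey : pvEnc p ∉ P.map pvEnc := fun h => h1 (hmem1.mp h)
          have hinv : pvEnc (p.2, p.1) ∉ P.map pvEnc := fun h => h2 (hmem2.mp h)
          have hc1 : PySem.Set.contains S p = false := by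
            cases hb : PySem.Set.contains S p with
            | false => rfl
            | true => exact absurd ((hS p).mp hb) h1
          have hc2 : PySem.Set.contains S (p.2, p.1) = false := by
            cases hb : PySem.Set.contains S (p.2, p.1) with
            | false => rfl
            | true => exact absurd ((hS _).mp hb) h2
          have hstA : pvStepA' (P.map pvEnc, C) p
              = (P.map pvEnc ++ [pvEnc p], C ++ [1]) := by
            unfold pvStepA'
            dsimp only
            rw [if_pos ⟨(by simpa [pvEnc] using hkey), (by simpa [pvEnc] using hinv)⟩]
            rfl
          have hstB : pvSelStep d (P.map pvEnc, T, S) p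
              = (P.map pvEnc ++ [pvEnc p], T ++ [d.getD p 0], PySem.Set.add S p) := by
            unfold pvSelStep; rw [hc1, hc2]; rfl
          rw [hstA, hstB]
          have hmapP : (P ++ [p]).map pvEnc = P.map pvEnc ++ [pvEnc p] := by simp
          rw [← hmapP]
          apply ih (P ++ [p]) (C ++ [1]) (T ++ [d.getD p 0]) (PySem.Set.add S p)
            hfe'
            (by intro q hq
                rcases List.mem_append.mp hq with h | h
                · exact hfP q h
                · rw [List.mem_singleton.mp h]; exact hp)
            (by simp [List.nodup_append, hnd]
                intro a b hab hEq
                exact h1 (hEq ▸ hab))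
            (by simp [hC]) (by simp [hT])
          · intro i hi
            simp only [List.length_append, List.length_singleton] at hi
            by_cases hii : i < P.length
            · rw [List.getD_append _ _ _ _ (by omega : i < T.length),
                List.getD_append _ _ _ _ (by omega : i < C.length),
                List.getD_append _ _ _ _ hii]
              have hTCi := hTC i hii
              have hPne : P.getD i ("", "") ≠ p := by
                rw [List.getD_eq_getElem P _ hii]
                intro h
                exact h1 (h ▸ P.getElem_mem hii)
              rwa [List.count_cons_of_ne (fun h => hPne h.symm)] at hTCi
            · have hie : i = P.length := by omega
              subst hie
              rw [List.getD_append_right _ _ _ _ (by omega : T.length ≤ P.length),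
                List.getD_append_right _ _ _ _ (by omega : C.length ≤ P.length),
                List.getD_append_right _ _ _ _ (le_refl _)]
              rw [hT, hC, Nat.sub_self]
              simp only [List.getD_cons_zero]
              rw [hd p hp h1 h2, List.count_cons_self]
              push_cast
              ring
          · intro q hqf hq1 hq2
            have hq1' : q ∉ P := fun h => hq1 (List.mem_append_left _ h)
            have hq2' : (q.2, q.1) ∉ P := fun h => hq2 (List.mem_append_left _ h)
            have hqp : q ≠ p := fun h => hq1 (List.mem_append_right _ (by simp [h]))
            have := hd q hqf hq1' hq2'
            rwa [List.count_cons_of_ne (fun h => hqp h.symm)] at this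
          · intro q
            rw [PySem.Set.contains_iff, PySem.Set.mem_add]
            constructor
            · intro h
              rcases h with h | h
              · exact List.mem_append_left _ ((hS q).mp ((PySem.Set.contains_iff S q).mpr h))
              · exact List.mem_append_right _ (by simp [h])
            · intro h
              rcases List.mem_append.mp h with h | h
              · exact Or.inl ((PySem.Set.contains_iff S q).mp ((hS q).mpr h))
              · exact Or.inr (List.mem_singleton.mp h)

-- A's loop over clashs is A's per-pair loop over the extracted pairs
theorem pvFoldFilterMap (clashs : List (List (String × String))) :
    ∀ st, clashs.foldl pvStepA st = (clashs.filterMap pvParOf).foldl pvStepA' st := by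
  induction clashs with
  | nil => intro st; rfl
  | cons c cs ih =>
      intro st
      rw [List.foldl_cons, List.filterMap_cons]
      cases h : pvParOf c with
      | none =>
          have hstep : pvStepA st c = st := by rw [pvStepA_eq st c, h]
          rw [hstep]
          exact ih st
      | some p =>
          have hstep : pvStepA st c = pvStepA' st p := by rw [pvStepA_eq st c, h]
          rw [List.foldl_cons, hstep]
          exact ih _

-- what pvParOf c = some p says about c
theorem pvParOf_eq (c : List (String × String)) (p : String × String)
    (h : pvParOf c = some p) :
    (c.lookup "layer_1").getD "" = p.1 ∧ (c.lookup "layer_2").getD "" = p.2 ∧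
    p.1 ≠ "" ∧ p.2 ≠ "" := by
  unfold pvParOf at h
  cases h1 : c.lookup "layer_1" <;> rw [h1] at h
  · simp at h
  · cases h2 : c.lookup "layer_2" <;> rw [h2] at h
    · simp at h
    · simp only [] at h
      split at h
      · cases h
        rename_i hg
        simp only [Bool.and_eq_true, bne_iff_ne, ne_eq] at hg
        exact ⟨rfl, rfl, hg.1, hg.2⟩
      · cases h

-- Pre_ gives pairwise key-injectivity of the extracted pairs
theorem pvParesInj (clashs : List (List (String × String)))
    (hpre : Pre_contagem_conflitos_totais clashs) :
    pvInjOn (clashs.filterMap pvParOf) := by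
  intro p hp q hq
  obtain ⟨c, hc, hpc⟩ := List.mem_filterMap.mp hp
  obtain ⟨c', hc', hqc⟩ := List.mem_filterMap.mp hq
  obtain ⟨e1, e2, n1, n2⟩ := pvParOf_eq c p hpc
  obtain ⟨e1', e2', n1', n2'⟩ := pvParOf_eq c' q hqc
  have h := hpre c hc c' hc'
  rw [e1, e2, e1', e2'] at h
  have h' := h ⟨n1, n2, n1', n2'⟩
  constructor
  · intro he
    obtain ⟨ha, hb⟩ := h'.1 he
    exact Prod.ext ha hb
  · intro he
    obtain ⟨ha, hb⟩ := h'.2 he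
    exact Prod.ext ha hb

-- ===== VERDICT (by name: the statement is the Claim_ definition above) =====
theorem contagem_conflitos_totais_spec : Claim_equal_contagem_conflitos_totais := by
  intro clashs _ hpre
  unfold Spec_contagem_conflitos_totais contagem_conflitos_totais contagem_conflitos_totais_alt
  dsimp only
  have hfold := pvFoldFilterMap clashs (([], []) : List String × List Int)
  have hd0 : ∀ q, q ∈ clashs.filterMap pvParOf → q ∉ ([] : List (String × String)) →
      (q.2, q.1) ∉ ([] : List (String × String)) →
      ((clashs.filterMap pvParOf).foldl (fun d p => d.insert p (d.getD p 0 + 1))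
        PySem.Dict.empty).getD q 0 = ((clashs.filterMap pvParOf).count q : Int) := by
    intro q _ _ _
    rw [pvCounterGetD, PySem.Dict.getD_empty]
    ring
  obtain ⟨e1, e2⟩ := pvMain
    ((clashs.filterMap pvParOf).foldl (fun d p => d.insert p (d.getD p 0 + 1)) PySem.Dict.empty)
    (clashs.filterMap pvParOf) (pvParesInj clashs hpre)
    (clashs.filterMap pvParOf) [] [] [] PySem.Set.empty
    (fun p h => h) (by intro p h; cases h) List.nodup_nil rfl rfl
    (by intro i h; simp at h) hd0
    (by intro q; exact PySem.Set.contains_iff _ q)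
  rw [hfold]
  exact Prod.ext e1 e2
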